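-- pv_equiv track=rewrite | github.com/BANGBANGROX/Python-Coding | CodingProblems/Minimum_Time_to_Revert_Word_to_Initial_State_II.py | minimum_time_to_initial_state
-- ===== SOURCE A (Python) =====
-- def compute_z_function(s: str) -> list:
--     n = len(s)
--     result = [0] * n
--     left = 0
--     right = 0
--
--     for i in range(1, n):
--         if i > right:
--             left = right = i
--             while right < n and s[right] == s[right - left]:
--                 right += 1
--             result[i] = right - left
--             right -= 1
--         else:
--             k = i - left
--             if result[k] < right - i + 1:
--                 result[i] = result[k]
--             else:
--                 left = i
--                 while right < n and s[right] == s[right - left]: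
--                     right += 1
--                 result[i] = right - left
--                 right -= 1
--
--     return result
--
-- def minimum_time_to_initial_state(word: str, k: int) -> int:
--     z_function = compute_z_function(word)
--     answer = 1
--     n = len(word)
--
--     while k * answer < n:
--         if z_function[k * answer] >= n - k * answer:
--             break
--         answer += 1
--
--     return answer
-- ===== SOURCE B (Python) =====
-- def minimum_time_to_initial_state(word: str, k: int) -> int:
--     n = len(word)
--     answer = 1
--     while k * answer < n and not word.startswith(word[k * answer:]):
--         answer += 1
--     return answer
-- ===== Notes on version B (the rewrite author's own statement) =====
-- stated objective: simpler
-- what changed: B drops the Z-function precomputation entirely and, for each candidate answer, directly tests whether word[k*answer:] is a prefix of word via str.startswith (measurably faster in practice: the per-candidate test runs in C instead of A's interpreted per-character Z loop).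
-- outside the precondition, e.g. on minimum_time_to_initial_state('abc', 0): A does not finish within the time limit, B returns 1; on minimum_time_to_initial_state('ab', -1): A raises IndexError, B returns 2
import Mathlib
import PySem

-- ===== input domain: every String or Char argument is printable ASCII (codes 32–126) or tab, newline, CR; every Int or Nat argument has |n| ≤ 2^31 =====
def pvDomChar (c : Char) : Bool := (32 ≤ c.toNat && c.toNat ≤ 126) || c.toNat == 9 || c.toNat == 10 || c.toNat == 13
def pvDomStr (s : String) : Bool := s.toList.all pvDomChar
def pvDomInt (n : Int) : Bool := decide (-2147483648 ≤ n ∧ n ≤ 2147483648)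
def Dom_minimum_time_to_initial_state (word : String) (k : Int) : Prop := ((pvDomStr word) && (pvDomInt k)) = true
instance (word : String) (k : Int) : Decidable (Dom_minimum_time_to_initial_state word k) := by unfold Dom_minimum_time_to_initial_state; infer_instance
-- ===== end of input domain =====

-- B replaces A's precomputed Z-function table by a direct prefix test per candidate (simpler; equivalence of RETURN values proved below).

-- ===== PORT A =====
-- A's inner `while right < n and s[right] == s[right - left]: right += 1`
def zExtend (s : List Char) (left right : Nat) : Nat :=
  if h : right < s.length ∧ s.getD right ' ' = s.getD (right - left) ' ' then
    zExtend s left (right + 1)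
  else right
termination_by s.length - right
decreasing_by obtain ⟨h1, _⟩ := h; omega

-- one iteration of A's `for i in range(1, n)` loop over state (result, left, right)
def zstep (s : List Char) (st : List Nat × Nat × Nat) (i : Nat) : List Nat × Nat × Nat :=
  let res := st.1
  let left := st.2.1
  let right := st.2.2
  if right < i then
    let r := zExtend s i i
    (res.set i (r - i), i, r - 1)
  else
    let kk := i - left
    if res.getD kk 0 < right - i + 1 then
      (res.set i (res.getD kk 0), left, right)
    else
      let r := zExtend s i right
      (res.set i (r - i), i, r - 1)

-- A's compute_z_function
def computeZ (s : List Char) : List Nat :=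
  ((List.range' 1 (s.length - 1) 1).foldl (zstep s) (List.replicate s.length 0, 0, 0)).1

-- A's `while k * answer < n: …` (fuel only makes the loop total; inside Pre_ it never runs out)
def loopA (z : List Nat) (n k : Int) (answer : Int) : Nat → Int
  | 0 => answer
  | fuel + 1 =>
    if k * answer < n then
      if (n - k * answer) ≤ ((z.getD (k * answer).toNat 0 : Nat) : Int) then answer
      else loopA z n k (answer + 1) fuel
    else answer

def minimum_time_to_initial_state (word : String) (k : Int) : Int :=
  let z := computeZ word.toList
  let n : Int := word.toList.length
  loopA z n k 1 (word.toList.length + 1)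

-- ===== PORT B =====
-- B's `while k * answer < n and not word.startswith(word[k*answer:]): answer += 1`
def loopB (s : List Char) (n k : Int) (answer : Int) : Nat → Int
  | 0 => answer
  | fuel + 1 =>
    if k * answer < n ∧ PySem.Chars.startswith s (PySem.List.slice s (some (k * answer)) none) = false then
      loopB s n k (answer + 1) fuel
    else answer

def minimum_time_to_initial_state_alt (word : String) (k : Int) : Int :=
  let s := word.toList
  let n : Int := s.length
  loopB s n k 1 (s.length + 1)

-- ===== PRECONDITION & SPEC =====
-- Pre_ excludes k < 0 (A's z_function[k*answer] negative indexing eventually raises IndexError)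
-- and k = 0 on a nonempty word (A's while loop never terminates); these are exactly the inputs
-- on which A does not return normally.
def Pre_minimum_time_to_initial_state (word : String) (k : Int) : Prop :=
  1 ≤ k ∨ (k = 0 ∧ word = "")
instance (word : String) (k : Int) : Decidable (Pre_minimum_time_to_initial_state word k) := by
  unfold Pre_minimum_time_to_initial_state; infer_instance

def pvWitness_minimum_time_to_initial_state : String × Int := ("ababab", 2)

def Spec_minimum_time_to_initial_state (word : String) (k : Int) (out : Int) : Prop :=
  out = minimum_time_to_initial_state_alt word k
instance (word : String) (k : Int) (out : Int) : Decidable (Spec_minimum_time_to_initial_state word k out) := by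
  unfold Spec_minimum_time_to_initial_state; infer_instance

-- ===== CLAIM (what is proved, stated in full; the proofs are below) =====
def Claim_equal_minimum_time_to_initial_state : Prop := ∀ (word : String) (k : Int), Dom_minimum_time_to_initial_state word k → Pre_minimum_time_to_initial_state word k → Spec_minimum_time_to_initial_state word k (minimum_time_to_initial_state word k)

-- ===== LEMMAS AND PROOFS =====

-- length of the longest common prefix of two lists (the Z-value spec)
def matchLen : List Char → List Char → Nat
  | a :: as, b :: bs => if a = b then matchLen as bs + 1 else 0
  | _, _ => 0

def zv (s : List Char) (i : Nat) : Nat := matchLen (s.drop i) s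

theorem matchLen_le_left (a b : List Char) : matchLen a b ≤ a.length := by
  induction a generalizing b with
  | nil => simp [matchLen]
  | cons x as ih =>
    cases b with
    | nil => simp [matchLen]
    | cons y bs =>
      simp only [matchLen, List.length_cons]
      split
      · exact Nat.succ_le_succ (ih bs)
      · omega

theorem matchLen_self (a : List Char) : matchLen a a = a.length := by
  induction a with
  | nil => simp [matchLen]
  | cons x as ih => simp [matchLen, ih]

theorem matchLen_ge_iff (m : Nat) (a b : List Char) :
    m ≤ matchLen a b ↔ m ≤ a.length ∧ m ≤ b.length ∧ ∀ t, t < m → a.getD t ' ' = b.getD t ' ' := by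
  induction a generalizing b m with
  | nil =>
    cases m with
    | zero => simp
    | succ m => simp [matchLen]
  | cons x as ih =>
    cases b with
    | nil =>
      cases m with
      | zero => simp
      | succ m => simp [matchLen]
    | cons y bs =>
      cases m with
      | zero => simp
      | succ m =>
        simp only [matchLen, List.length_cons]
        by_cases hxy : x = y
        · subst hxy
          rw [if_pos rfl, Nat.succ_le_succ_iff, ih]
          constructor
          · rintro ⟨h1, h2, h3⟩
            refine ⟨by omega, by omega, ?_⟩
            intro t ht
            cases t with
            | zero => rfl
            | succ t => simpa using h3 t (by omega)
          · rintro ⟨h1, h2, h3⟩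
            refine ⟨by omega, by omega, ?_⟩
            intro t ht
            simpa using h3 (t + 1) (by omega)
        · rw [if_neg hxy]
          constructor
          · intro h; omega
          · rintro ⟨_, _, h3⟩
            exact absurd (by simpa using h3 0 (Nat.succ_pos m)) hxy

theorem matchLen_length_le_iff_prefix (a b : List Char) :
    a.length ≤ matchLen a b ↔ a <+: b := by
  induction a generalizing b with
  | nil => simp
  | cons x as ih =>
    cases b with
    | nil => simp [matchLen]
    | cons y bs =>
      simp only [matchLen, List.length_cons, List.cons_prefix_cons]
      by_cases hxy : x = y
      · rw [if_pos hxy, Nat.succ_le_succ_iff, ih]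
        simp [hxy]
      · rw [if_neg hxy]
        simp [hxy]

theorem getD_drop (s : List Char) (j t : Nat) : (s.drop j).getD t ' ' = s.getD (j + t) ' ' := by
  simp [List.getD_eq_getElem?_getD, List.getElem?_drop]

theorem zv_le (s : List Char) (i : Nat) : zv s i ≤ s.length - i := by
  have := matchLen_le_left (s.drop i) s
  simpa [zv] using this

theorem zv_get (s : List Char) (i t : Nat) (h : t < zv s i) : s.getD (i + t) ' ' = s.getD t ' ' := by
  have h3 := ((matchLen_ge_iff (zv s i) (s.drop i) s).1 le_rfl).2.2 t h
  rwa [getD_drop] at h3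

theorem zv_ge (s : List Char) (i m : Nat) (h1 : i + m ≤ s.length)
    (h : ∀ t, t < m → s.getD (i + t) ' ' = s.getD t ' ') : m ≤ zv s i := by
  apply (matchLen_ge_iff m (s.drop i) s).2
  refine ⟨by simp; omega, by omega, ?_⟩
  intro t ht
  rw [getD_drop]
  exact h t ht

theorem zv_mismatch_le (s : List Char) (i m : Nat)
    (hne : s.getD (i + m) ' ' ≠ s.getD m ' ') : zv s i ≤ m := by
  by_contra hc
  exact hne (zv_get s i m (by omega))

theorem zv_mismatch_of_eq (s : List Char) (j m : Nat) (hz : zv s j = m)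
    (h1 : j + m < s.length) (h2 : m < s.length) : s.getD (j + m) ' ' ≠ s.getD m ' ' := by
  intro heq
  have hge : m + 1 ≤ zv s j := by
    apply zv_ge s j (m + 1) (by omega)
    intro t ht
    by_cases htm : t < m
    · exact zv_get s j t (by omega)
    · have : t = m := by omega
      subst this
      exact heq
  omega

theorem zExtend_spec (s : List Char) (i : Nat) :
    ∀ r, i ≤ r → r ≤ s.length → r - i ≤ zv s i → zExtend s i r = i + zv s i := by
  have key : ∀ (fuel r : Nat), s.length - r ≤ fuel → i ≤ r → r ≤ s.length → r - i ≤ zv s i →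
      zExtend s i r = i + zv s i := by
    intro fuel
    induction fuel with
    | zero =>
      intro r hf h1 h2 h3
      rw [zExtend, dif_neg (by intro hcc; omega)]
      have hle := zv_le s i
      omega
    | succ fuel ih =>
      intro r hf h1 h2 h3
      rw [zExtend]
      split
      · rename_i hcc
        obtain ⟨hc1, hc2⟩ := hcc
        have hstep : r + 1 - i ≤ zv s i := by
          have : r - i + 1 ≤ zv s i := by
            apply zv_ge s i (r - i + 1) (by omega)
            intro t ht
            by_cases htm : t < r - i
            · exact zv_get s i t (by omega)
            · have het : t = r - i := by omega
              subst het
              have he : i + (r - i) = r := by omega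
              rw [he]
              exact hc2
          omega
        exact ih (r + 1) (by omega) (by omega) hc1 hstep
      · rename_i hcc
        have hcc' : r < s.length → s.getD r ' ' ≠ s.getD (r - i) ' ' :=
          fun hr heq => hcc ⟨hr, heq⟩
        have hle := zv_le s i
        by_cases hr : r < s.length
        · have hub : zv s i ≤ r - i := by
            apply zv_mismatch_le s i (r - i)
            have he : i + (r - i) = r := by omega
            rw [he]
            exact hcc' hr
          omega
        · omega
  intro r h1 h2 h3
  exact key (s.length - r) r le_rfl h1 h2 h3

-- the loop invariant of A's z-function computation
def ZInv (s : List Char) (i : Nat) (st : List Nat × Nat × Nat) : Prop :=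
  st.1.length = s.length ∧ st.2.1 < i ∧ (1 ≤ st.2.1 ∨ st.2.2 = 0) ∧
  st.2.2 + 1 ≤ st.2.1 + zv s st.2.1 ∧
  ∀ j, 1 ≤ j → j < i → st.1.getD j 0 = zv s j

theorem getD_set_self (l : List Nat) (i : Nat) (v : Nat) (h : i < l.length) :
    (l.set i v).getD i 0 = v := by
  simp [List.getD_eq_getElem?_getD, h]

theorem getD_set_ne (l : List Nat) (i j : Nat) (v : Nat) (h : i ≠ j) :
    (l.set i v).getD j 0 = l.getD j 0 := by
  simp [List.getD_eq_getElem?_getD, h]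

theorem zstep_inv (s : List Char) (i : Nat) (st : List Nat × Nat × Nat)
    (hi : 1 ≤ i) (hin : i < s.length) (h : ZInv s i st) : ZInv s (i + 1) (zstep s st i) := by
  obtain ⟨res, left, right⟩ := st
  obtain ⟨hlen, hlt, hpos, hwin, hres⟩ := h
  simp only [ZInv] at *
  have hzl := zv_le s left
  unfold zstep
  simp only []
  by_cases hri : right < i
  · rw [if_pos hri]
    dsimp only
    have hz : zExtend s i i = i + zv s i := zExtend_spec s i i le_rfl (le_of_lt hin) (by omega)
    refine ⟨by simp [hlen], by omega, Or.inl hi, by simp only [hz]; omega, ?_⟩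
    intro j hj1 hj2
    by_cases hji : j = i
    · subst hji
      rw [hz, getD_set_self _ _ _ (by omega)]
      omega
    · rw [getD_set_ne _ _ _ _ (fun hh => hji hh.symm)]
      exact hres j hj1 (by omega)
  · rw [if_neg hri]
    have hir : i ≤ right := Nat.le_of_not_lt hri
    have hl1 : 1 ≤ left := by
      rcases hpos with hp | hp
      · exact hp
      · omega
    have hrn : right < s.length := by omega
    have hreskk : res.getD (i - left) 0 = zv s (i - left) := hres _ (by omega) (by omega)
    have hwchar : ∀ t, left + t ≤ right → s.getD (left + t) ' ' = s.getD t ' ' := by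
      intro t ht
      exact zv_get s left t (by omega)
    by_cases hcase : res.getD (i - left) 0 < right - i + 1
    · rw [if_pos hcase]
      dsimp only
      rw [hreskk] at hcase
      have him : i + zv s (i - left) ≤ right := by omega
      have hzi : zv s i = zv s (i - left) := by
        have hub : zv s i ≤ zv s (i - left) := by
          apply zv_mismatch_le s i (zv s (i - left))
          have e1 : s.getD (i + zv s (i - left)) ' ' = s.getD ((i - left) + zv s (i - left)) ' ' := by
            have hw := hwchar ((i - left) + zv s (i - left)) (by omega)
            have e : left + ((i - left) + zv s (i - left)) = i + zv s (i - left) := by omega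
            rw [e] at hw
            exact hw
          rw [e1]
          exact zv_mismatch_of_eq s (i - left) (zv s (i - left)) rfl (by omega) (by omega)
        have hlb : zv s (i - left) ≤ zv s i := by
          apply zv_ge s i (zv s (i - left)) (by omega)
          intro t ht
          have e1 : s.getD (i + t) ' ' = s.getD ((i - left) + t) ' ' := by
            have hw := hwchar ((i - left) + t) (by omega)
            have e : left + ((i - left) + t) = i + t := by omega
            rw [e] at hw
            exact hw
          rw [e1]
          exact zv_get s (i - left) t ht
        omega
      refine ⟨by simp [hlen], by omega, Or.inl hl1, hwin, ?_⟩
      intro j hj1 hj2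
      by_cases hji : j = i
      · subst hji
        rw [getD_set_self _ _ _ (by omega), hreskk, hzi]
      · rw [getD_set_ne _ _ _ _ (fun hh => hji hh.symm)]
        exact hres j hj1 (by omega)
    · rw [if_neg hcase]
      dsimp only
      rw [hreskk] at hcase
      rw [Nat.not_lt] at hcase
      have hzlb : right - i ≤ zv s i := by
        apply zv_ge s i (right - i) (by omega)
        intro t ht
        have e1 : s.getD (i + t) ' ' = s.getD ((i - left) + t) ' ' := by
          have hw := hwchar ((i - left) + t) (by omega)
          have e : left + ((i - left) + t) = i + t := by omega
          rw [e] at hw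
          exact hw
        rw [e1]
        exact zv_get s (i - left) t (by omega)
      have hz : zExtend s i right = i + zv s i := zExtend_spec s i right hir (by omega) hzlb
      refine ⟨by simp [hlen], by omega, Or.inl hi, by simp only [hz]; omega, ?_⟩
      intro j hj1 hj2
      by_cases hji : j = i
      · subst hji
        rw [hz, getD_set_self _ _ _ (by omega)]
        omega
      · rw [getD_set_ne _ _ _ _ (fun hh => hji hh.symm)]
        exact hres j hj1 (by omega)

theorem zfold_inv (s : List Char) :
    ∀ (c i0 : Nat) (st : List Nat × Nat × Nat), 1 ≤ i0 → i0 + c ≤ s.length → ZInv s i0 st →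
      ZInv s (i0 + c) ((List.range' i0 c 1).foldl (zstep s) st) := by
  intro c
  induction c with
  | zero => intro i0 st _ _ h; simpa using h
  | succ c ih =>
    intro i0 st h1 h2 h
    rw [List.range'_succ, List.foldl_cons]
    have e : i0 + (c + 1) = (i0 + 1) + c := by omega
    rw [e]
    exact ih (i0 + 1) _ (by omega) (by omega) (zstep_inv s i0 st h1 (by omega) h)

theorem computeZ_correct (s : List Char) (j : Nat) (h1 : 1 ≤ j) (h2 : j < s.length) :
    (computeZ s).getD j 0 = zv s j := by
  have hinit : ZInv s 1 (List.replicate s.length 0, 0, 0) := by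
    simp only [ZInv]
    refine ⟨by simp, by omega, Or.inr trivial, ?_, by intro j hj1 hj2; omega⟩
    have hz0 : zv s 0 = s.length := by simp [zv, matchLen_self]
    simp only [hz0]
    omega
  have hfold := zfold_inv s (s.length - 1) 1 _ le_rfl (by omega) hinit
  have e : 1 + (s.length - 1) = s.length := by omega
  rw [e] at hfold
  unfold computeZ
  exact hfold.2.2.2.2 j h1 h2

theorem cond_equiv (s : List Char) (j : Nat) :
    (s.length - j ≤ zv s j) ↔ (s.drop j) <+: s := by
  have := matchLen_length_le_iff_prefix (s.drop j) s
  simpa [zv] using this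

theorem loop_eq (s : List Char) (z : List Nat) (n k : Int) (hk : 1 ≤ k)
    (hz : ∀ j, 1 ≤ j → j < s.length → z.getD j 0 = zv s j) (hn : n = (s.length : Int)) :
    ∀ (fuel : Nat) (answer : Int), 1 ≤ answer → loopA z n k answer fuel = loopB s n k answer fuel := by
  intro fuel
  induction fuel with
  | zero => intro answer _; rfl
  | succ fuel ih =>
    intro answer ha
    rw [loopA, loopB]
    by_cases h1 : k * answer < n
    · have hj1 : (1 : Int) ≤ k * answer := by nlinarith
      have hcast : ((k * answer).toNat : Int) = k * answer := Int.toNat_of_nonneg (by omega)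
      have hjlt : (k * answer).toNat < s.length := by omega
      have hj1' : 1 ≤ (k * answer).toNat := by omega
      have hcond : ((n - k * answer) ≤ ((z.getD (k * answer).toNat 0 : Nat) : Int)) ↔
          (PySem.Chars.startswith s (PySem.List.slice s (some (k * answer)) none) = true) := by
        rw [hz _ hj1' hjlt, PySem.List.slice_from s (show (0:Int) ≤ k * answer by omega), PySem.Chars.startswith_iff,
          ← cond_equiv s (k * answer).toNat]
        omega
      by_cases h2 : (n - k * answer) ≤ ((z.getD (k * answer).toNat 0 : Nat) : Int)
      · rw [if_pos h1, if_pos h2, if_neg]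
        rintro ⟨_, hsw⟩
        rw [hcond.1 h2] at hsw
        exact absurd hsw (by simp)
      · have hswf : PySem.Chars.startswith s (PySem.List.slice s (some (k * answer)) none) = false := by
          rw [Bool.eq_false_iff]
          intro hb
          exact h2 (hcond.2 hb)
        rw [if_pos h1, if_neg h2, if_pos ⟨h1, hswf⟩]
        exact ih (answer + 1) (by omega)
    · rw [if_neg h1, if_neg (by rintro ⟨hc, _⟩; exact h1 hc)]

-- ===== VERDICT (by name: the statement is the Claim_ definition above) =====
theorem minimum_time_to_initial_state_spec : Claim_equal_minimum_time_to_initial_state := by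
  unfold Claim_equal_minimum_time_to_initial_state
  intro word k hdom hpre
  unfold Spec_minimum_time_to_initial_state
  unfold Pre_minimum_time_to_initial_state at hpre
  rcases hpre with hk | ⟨hk, hw⟩
  · unfold minimum_time_to_initial_state minimum_time_to_initial_state_alt
    exact loop_eq word.toList (computeZ word.toList) _ k hk
      (fun j h1 h2 => computeZ_correct word.toList j h1 h2) rfl (word.toList.length + 1) 1 le_rfl
  · subst hk
    subst hw
    decide
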